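-- pv_equiv track=rewrite | github.com/Neon12-ofx/DSA | Adv_Recursion/Generating_subsequence_sum.py | solve
-- ===== SOURCE A (Python) =====
-- def solve(nums,ind,subset,target):
--     result=[]
--     if ind >= len(nums):
--         if sum(subset) == target:
--             result.append(subset.copy())
--         return result
--
--     subset.append(nums[ind])
--     result += solve(nums,ind+1,subset,target)
--     subset.pop()
--     result += solve(nums,ind+1,subset,target)
--     return result
-- ===== SOURCE B (Python) =====
-- def solve(nums, ind, subset, target):
--     pairs = [(list(subset), sum(subset))]
--     for x in nums[ind:]:
--         pairs = [q for s, t in pairs for q in ((s + [x], t + x), (s, t))]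
--     return [s for s, t in pairs if t == target]
-- ===== Notes on version B (the rewrite author's own statement) =====
-- stated objective: alternative
-- what changed: Recursive include/exclude DFS replaced by an iterative breadth-first doubling pass that builds all (subset, running-sum) pairs over nums[ind:] and filters by target at the end, avoiding the per-leaf sum() recomputation.
-- outside the precondition, e.g. on solve([1, 2], -1, [], 2): A returns [[2], [2]], B returns [[2]]; on solve([1], -2, [], 0): A raises IndexError, B returns [[]]
import Mathlib
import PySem

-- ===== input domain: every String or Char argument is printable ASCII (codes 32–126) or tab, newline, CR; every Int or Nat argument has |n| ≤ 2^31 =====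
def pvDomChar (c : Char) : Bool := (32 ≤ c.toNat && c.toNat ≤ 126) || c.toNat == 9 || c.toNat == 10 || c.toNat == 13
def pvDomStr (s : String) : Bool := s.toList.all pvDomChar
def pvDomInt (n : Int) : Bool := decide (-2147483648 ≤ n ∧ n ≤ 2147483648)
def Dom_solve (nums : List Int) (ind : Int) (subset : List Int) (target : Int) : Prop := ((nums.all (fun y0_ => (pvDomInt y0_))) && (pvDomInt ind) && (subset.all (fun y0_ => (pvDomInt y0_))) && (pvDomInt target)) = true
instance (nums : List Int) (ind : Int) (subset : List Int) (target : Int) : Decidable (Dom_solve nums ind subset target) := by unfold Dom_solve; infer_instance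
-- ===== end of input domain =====

-- B replaces A's include/exclude DFS recursion by one iterative doubling pass over nums[ind:]
-- carrying (subset, running sum) pairs, filtered by target at the end (objective: alternative).
-- A temporarily appends to / pops from `subset` but restores it; the claim is about return values.

-- ===== PORT A =====
def solve (nums : List Int) (ind : Int) (subset : List Int) (target : Int) : List (List Int) :=
  if _h : (nums.length : Int) ≤ ind then
    (if subset.sum = target then [subset] else [])
  else
    match PySem.List.pyGet? nums ind with
    | none => []   -- Python raises IndexError here (ind < -len); outside Pre_solve
    | some x =>
        solve nums (ind + 1) (subset ++ [x]) target ++ solve nums (ind + 1) subset target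
termination_by ((nums.length : Int) - ind).toNat
decreasing_by all_goals omega

-- ===== PORT B =====
def solve_alt (nums : List Int) (ind : Int) (subset : List Int) (target : Int) : List (List Int) :=
  let pairs : List (List Int × Int) :=
    (PySem.List.slice nums (some ind) none).foldl
      (fun acc x => acc.flatMap (fun st => [(st.1 ++ [x], st.2 + x), (st.1, st.2)]))
      [(subset, subset.sum)]
  (pairs.filter (fun st => st.2 == target)).map Prod.fst

-- ===== PRECONDITION & SPEC =====
-- Pre_ excludes negative ind, where A either raises IndexError (ind < -len(nums)) or returns
-- subsets with elements duplicated by Python's negative-index wraparound, an artefact no caller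
-- of this recursion helper would specify (callers start at ind = 0).
def Pre_solve (nums : List Int) (ind : Int) (subset : List Int) (target : Int) : Prop := 0 ≤ ind
instance (nums : List Int) (ind : Int) (subset : List Int) (target : Int) : Decidable (Pre_solve nums ind subset target) := by unfold Pre_solve; infer_instance
def pvWitness_solve : List Int × Int × List Int × Int := ([1, 2, 3], 0, [], 3)

def Spec_solve (nums : List Int) (ind : Int) (subset : List Int) (target : Int) (out : List (List Int)) : Prop := out = solve_alt nums ind subset target
instance (nums : List Int) (ind : Int) (subset : List Int) (target : Int) (out : List (List Int)) : Decidable (Spec_solve nums ind subset target out) := by unfold Spec_solve; infer_instance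

-- ===== CLAIM (what is proved, stated in full; the proofs are below) =====
def Claim_equal_solve : Prop := ∀ (nums : List Int) (ind : Int) (subset : List Int) (target : Int), Dom_solve nums ind subset target → Pre_solve nums ind subset target → Spec_solve nums ind subset target (solve nums ind subset target)

-- ===== LEMMAS AND PROOFS =====

-- DFS characterisation of A over the suffix it still has to process.
def pvGo (xs : List Int) (s : List Int) (t : Int) : List (List Int) :=
  match xs with
  | [] => if s.sum = t then [s] else []
  | x :: xs => pvGo xs (s ++ [x]) t ++ pvGo xs s t

-- the pairs B's fold produces from one seed pair
def pvSubs (xs : List Int) (p : List Int × Int) : List (List Int × Int) :=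
  match xs with
  | [] => [p]
  | x :: xs => pvSubs xs (p.1 ++ [x], p.2 + x) ++ pvSubs xs p

theorem pv_foldl_subs (xs : List Int) : ∀ (acc : List (List Int × Int)),
    xs.foldl (fun acc x => acc.flatMap (fun st => [(st.1 ++ [x], st.2 + x), (st.1, st.2)])) acc
      = acc.flatMap (pvSubs xs) := by
  induction xs with
  | nil => intro acc; simp [pvSubs]
  | cons x xs ih =>
      intro acc
      simp only [List.foldl_cons, ih, List.flatMap_assoc]
      congr 1
      funext p
      simp [pvSubs]

theorem pv_subs_filter (t : Int) : ∀ (xs s : List Int) (c : Int), c = s.sum →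
    ((pvSubs xs (s, c)).filter (fun st => st.2 == t)).map Prod.fst = pvGo xs s t := by
  intro xs
  induction xs with
  | nil =>
      intro s c hc
      subst hc
      by_cases h : s.sum = t <;> simp [pvSubs, pvGo, List.filter, h]
  | cons x xs ih =>
      intro s c hc
      simp only [pvSubs, pvGo, List.filter_append, List.map_append]
      rw [ih (s ++ [x]) (c + x) (by simp [hc]), ih s c hc]

theorem pv_solve_eq_go : ∀ (k : Nat) (nums : List Int) (n : Nat) (subset : List Int) (target : Int),
    nums.length - n ≤ k → solve nums (n : Int) subset target = pvGo (nums.drop n) subset target := by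
  intro k
  induction k with
  | zero =>
      intro nums n subset target hk
      have h : nums.length ≤ n := by omega
      rw [solve]
      simp [pvGo, List.drop_eq_nil_of_le h, h]
  | succ k ih =>
      intro nums n subset target hk
      by_cases h : nums.length ≤ n
      · rw [solve]
        simp [pvGo, List.drop_eq_nil_of_le h, h]
      · have hlt : n < nums.length := by omega
        rw [solve]
        have hget : PySem.List.pyGet? nums (n : Int) = some nums[n] := by
          simp [PySem.List.pyGet?_natCast, List.getElem?_eq_getElem hlt]
        have hcast : (n : Int) + 1 = ((n + 1 : Nat) : Int) := by push_cast; ring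
        simp only [hget, hcast]
        rw [dif_neg (show ¬((nums.length : Int) ≤ ((n : Nat) : Int)) by exact_mod_cast h)]
        rw [ih nums (n + 1) (subset ++ [nums[n]]) target (by omega),
            ih nums (n + 1) subset target (by omega),
            List.drop_eq_getElem_cons hlt, pvGo]

-- ===== VERDICT (by name: the statement is the Claim_ definition above) =====
theorem solve_spec : Claim_equal_solve := by
  intro nums ind subset target _hdom hpre
  unfold Spec_solve solve_alt
  have hind : ind = ((ind.toNat : Nat) : Int) := (Int.toNat_of_nonneg hpre).symm
  rw [hind, PySem.List.slice_from_natCast, pv_foldl_subs]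
  have : (List.flatMap (pvSubs (nums.drop ind.toNat)) [(subset, subset.sum)])
      = pvSubs (nums.drop ind.toNat) (subset, subset.sum) := by simp
  rw [this, pv_subs_filter target _ subset subset.sum rfl,
      pv_solve_eq_go (nums.length) nums ind.toNat subset target (by omega)]
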